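-- pv_equiv track=rewrite | github.com/nelly-siv/2025-2-level-labs | lab_2_spellcheck/main.py | initialize_levenshtein_matrix
-- ===== SOURCE A (Python) =====
-- def initialize_levenshtein_matrix(
--     token_length: int, candidate_length: int
-- ) -> list[list[int]] | None:
--     """
--     Initialize a 2D matrix for Levenshtein distance calculation.
--
--     Args:
--         token_length (int): Length of the first string.
--         candidate_length (int): Length of the second string.
--
--     Returns:
--         list[list[int]] | None: Initialized matrix with base cases filled.
--     """
--     if (
--         not isinstance(token_length, int)
--         or not isinstance(candidate_length, int)
--         or token_length < 0
--         or candidate_length < 0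
--         ):
--         return None
--     rows_count, columns_count = token_length + 1, candidate_length + 1
--     levenshtein_matrix = [[0 for _ in range(columns_count)] for _ in range(rows_count)]
--     for r_index in range(rows_count):
--         levenshtein_matrix[r_index][0] = r_index
--     for c_index in range(columns_count):
--         levenshtein_matrix[0][c_index] = c_index
--     return levenshtein_matrix
-- ===== SOURCE B (Python) =====
-- def initialize_levenshtein_matrix(
--     token_length: int, candidate_length: int
-- ) -> list[list[int]] | None:
--     if (
--         not isinstance(token_length, int)
--         or not isinstance(candidate_length, int)
--         or token_length < 0
--         or candidate_length < 0
--         ):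
--         return None
--     # build the matrix COLUMN-wise, then transpose with zip:
--     # column 0 holds the row indices 0..token_length,
--     # column j (j >= 1) holds j followed by zeros.
--     columns = [list(range(token_length + 1))]
--     for j in range(1, candidate_length + 1):
--         columns.append([j] + [0] * token_length)
--     return [list(row) for row in zip(*columns)]
-- ===== Notes on version B (the rewrite author's own statement) =====
-- stated objective: alternative
-- what changed: B constructs the matrix transposed (per-column lists: column 0 = row indices, column j = [j]+zeros) and then transposes it with zip(*columns), instead of zero-initialising a row-major grid and patching the first column and first row in two mutation loops.
import Mathlib
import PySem

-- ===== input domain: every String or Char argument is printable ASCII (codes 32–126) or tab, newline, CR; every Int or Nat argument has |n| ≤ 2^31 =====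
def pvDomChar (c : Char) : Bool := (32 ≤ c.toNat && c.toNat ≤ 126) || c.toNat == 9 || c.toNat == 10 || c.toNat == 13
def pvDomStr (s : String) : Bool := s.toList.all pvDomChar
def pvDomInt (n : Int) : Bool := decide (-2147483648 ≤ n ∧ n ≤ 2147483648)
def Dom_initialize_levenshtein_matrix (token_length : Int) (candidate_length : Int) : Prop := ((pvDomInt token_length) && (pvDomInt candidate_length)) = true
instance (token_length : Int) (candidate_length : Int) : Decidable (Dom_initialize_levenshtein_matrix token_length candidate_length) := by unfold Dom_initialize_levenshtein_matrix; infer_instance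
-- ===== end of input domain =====

-- B builds the matrix transposed (column lists) and flips it with a zip-style transpose,
-- instead of zero-initializing a row-major grid and patching two edges (alternative algorithm).

-- ===== PORT A =====
def initialize_levenshtein_matrix (token_length : Int) (candidate_length : Int) : Option (List (List Int)) :=
  if token_length < 0 ∨ candidate_length < 0 then
    none
  else
    let rows_count := token_length + 1
    let columns_count := candidate_length + 1
    let levenshtein_matrix : List (List Int) :=
      (PySem.List.pyRange 0 rows_count 1).map
        (fun _ => (PySem.List.pyRange 0 columns_count 1).map (fun _ => (0 : Int)))
    let levenshtein_matrix :=
      (PySem.List.pyRange 0 rows_count 1).foldl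
        (fun m r_index => m.modify r_index.toNat (fun row => row.set 0 r_index)) levenshtein_matrix
    let levenshtein_matrix :=
      (PySem.List.pyRange 0 columns_count 1).foldl
        (fun m c_index => m.modify 0 (fun row => row.set c_index.toNat c_index)) levenshtein_matrix
    some levenshtein_matrix

-- ===== PORT B =====
-- zip(*columns) ported by hand (exact: zip stops at the shortest column); we recurse on the
-- first column and cut off as soon as any remaining column is exhausted.
def pvZipTAux : List Int → List (List Int) → List (List Int)
  | [], _ => []
  | a :: rest, others =>
    if others.any List.isEmpty then []
    else (a :: others.map (fun l => l.headD 0)) :: pvZipTAux rest (others.map List.tail)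

def pvZipT : List (List Int) → List (List Int)
  | [] => []
  | c0 :: rest => pvZipTAux c0 rest

def initialize_levenshtein_matrix_alt (token_length : Int) (candidate_length : Int) : Option (List (List Int)) :=
  if token_length < 0 ∨ candidate_length < 0 then
    none
  else
    let columns : List (List Int) := [PySem.List.pyRange 0 (token_length + 1) 1]
    let columns :=
      (PySem.List.pyRange 1 (candidate_length + 1) 1).foldl
        (fun cols j => cols ++ [j :: List.replicate token_length.toNat 0]) columns
    some (pvZipT columns)

-- ===== PRECONDITION & SPEC =====
def Spec_initialize_levenshtein_matrix (token_length : Int) (candidate_length : Int) (out : Option (List (List Int))) : Prop := out = initialize_levenshtein_matrix_alt token_length candidate_length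
instance (token_length : Int) (candidate_length : Int) (out : Option (List (List Int))) : Decidable (Spec_initialize_levenshtein_matrix token_length candidate_length out) := by unfold Spec_initialize_levenshtein_matrix; infer_instance

-- ===== CLAIM (what is proved, stated in full; the proofs are below) =====
def Claim_equal_initialize_levenshtein_matrix : Prop := ∀ (token_length : Int) (candidate_length : Int), Dom_initialize_levenshtein_matrix token_length candidate_length → Spec_initialize_levenshtein_matrix token_length candidate_length (initialize_levenshtein_matrix token_length candidate_length)

-- ===== LEMMAS AND PROOFS =====

-- the common normal form both ports reduce to (t, c ≥ 0)
def pvTarget (t c : Int) : List (List Int) :=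
  PySem.List.pyRange 0 (c + 1) 1 ::
    (List.range t.toNat).map (fun i => ((i + 1 : Nat) : Int) :: List.replicate c.toNat (0 : Int))

-- ---- A-side lemmas ----

theorem pv_modify_append_lt {α : Type} (f : α → α) (m : List α) (x : α) (i : Nat)
    (h : i < m.length) : (m ++ [x]).modify i f = m.modify i f ++ [x] := by
  induction m generalizing i with
  | nil => simp at h
  | cons a l ih =>
    cases i with
    | zero => simp [List.modify]
    | succ j =>
      simp only [List.cons_append, List.modify_succ_cons]
      rw [ih j (by simpa using h)]

theorem pv_modify_append_eq {α : Type} (f : α → α) (m : List α) (x : α) :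
    (m ++ [x]).modify m.length f = m ++ [f x] := by
  induction m with
  | nil => simp [List.modify]
  | cons a l ih =>
    simp only [List.cons_append, List.length_cons, List.modify_succ_cons]
    rw [ih]

theorem pv_foldl_modify_append {α : Type} (F : Nat → α → α) (l : List Nat) (m : List α) (x : α)
    (h : ∀ i ∈ l, i < m.length) :
    l.foldl (fun m i => m.modify i (F i)) (m ++ [x]) =
      l.foldl (fun m i => m.modify i (F i)) m ++ [x] := by
  induction l generalizing m with
  | nil => rfl
  | cons a l ih =>
    simp only [List.foldl_cons]
    rw [pv_modify_append_lt (F a) m x a (h a (by simp)),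
        ih (m.modify a (F a)) (by intro i hi; simpa using h i (by simp [hi]))]

theorem pv_foldl_modify_range {α : Type} (F : Nat → α → α) (g : Nat → α) (n : Nat) :
    (List.range n).foldl (fun m i => m.modify i (F i)) ((List.range n).map g) =
      (List.range n).map (fun i => F i (g i)) := by
  induction n with
  | zero => rfl
  | succ k ih =>
    rw [List.range_succ, List.map_append, List.map_append, List.foldl_append]
    simp only [List.map_singleton, List.foldl_cons, List.foldl_nil]
    rw [pv_foldl_modify_append F (List.range k) ((List.range k).map g) (g k)
      (by intro i hi; simpa using List.mem_range.mp hi)]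
    rw [ih]
    simpa using pv_modify_append_eq (F k) ((List.range k).map (fun i => F i (g i))) (g k)

theorem pv_foldl_modify_zero_cons {α β : Type} (G : β → α → α) (l : List β) (a : α) (t : List α) :
    l.foldl (fun m c => m.modify 0 (G c)) (a :: t) = (l.foldl (fun a c => G c a) a) :: t := by
  induction l generalizing a with
  | nil => rfl
  | cons b l ih =>
    rw [List.foldl_cons, List.foldl_cons,
        show (a :: t).modify 0 (G b) = G b a :: t from rfl]
    exact ih (G b a)

theorem pv_A_eq (t c : Int) (ht : 0 ≤ t) (hc : 0 ≤ c) :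
    initialize_levenshtein_matrix t c = some (pvTarget t c) := by
  have hT : t + 1 = ((t.toNat + 1 : Nat) : Int) := by omega
  have hC : c + 1 = ((c.toNat + 1 : Nat) : Int) := by omega
  set T := t.toNat with hTdef
  set C := c.toNat with hCdef
  unfold initialize_levenshtein_matrix
  rw [if_neg (by omega)]
  simp only [hT, hC, PySem.List.pyRange_zero_natCast, List.foldl_map, Int.toNat_natCast,
    List.map_map, Function.comp_def]
  congr 1
  rw [show List.map (fun (_ : Nat) => (0 : Int)) (List.range (C + 1))
      = List.replicate (C + 1) (0 : Int) from by simp [List.map_const']]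
  rw [pv_foldl_modify_range (fun (i : Nat) (row : List Int) => row.set 0 ((i : Int)))
      (fun _ => List.replicate (C + 1) (0 : Int)) (T + 1)]
  rw [show List.range (T + 1) = 0 :: (List.range T).map Nat.succ from List.range_succ_eq_map (n := T)]
  simp only [List.map_cons, List.map_map, Function.comp_def]
  rw [pv_foldl_modify_zero_cons (fun (x : Nat) (row : List Int) => row.set x ((x : Int)))
      (List.range (C + 1))]
  unfold pvTarget
  rw [← hCdef, ← hTdef]
  congr 1
  · -- head row: folding the sets over the all-zero row yields 0..C
    rw [show ((List.replicate (C + 1) (0 : Int)).set 0 ((0 : Nat) : Int))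
        = List.map (fun (_ : Nat) => (0 : Int)) (List.range (C + 1)) from by
      simp [List.replicate_succ, List.map_const']]
    have h := pv_foldl_modify_range (fun (i : Nat) (_ : Int) => ((i : Int)))
      (fun _ => (0 : Int)) (C + 1)
    simp only [List.set_eq_modify] at h ⊢
    rw [h, hC]
    exact (PySem.List.pyRange_zero_natCast _).symm

-- ---- B-side lemmas ----

theorem pv_foldl_snoc {α β : Type} (f : β → α) (l : List β) (init : List α) :
    l.foldl (fun acc j => acc ++ [f j]) init = init ++ l.map f := by
  induction l generalizing init with
  | nil => simp
  | cons a l ih => simp [ih]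

-- transposing constant zero columns of height xs.length against a spine xs
theorem pv_zipTAux_zero (xs : List Int) (k : Nat) :
    pvZipTAux xs (List.replicate k (List.replicate xs.length (0 : Int))) =
      xs.map (fun x => x :: List.replicate k (0 : Int)) := by
  induction xs with
  | nil => rfl
  | cons a xs ih =>
    rw [pvZipTAux]
    have hne : (List.replicate k (List.replicate (a :: xs).length (0 : Int))).any List.isEmpty
        = false := by
      simp
    rw [hne]
    simp only [Bool.false_eq_true, if_false, List.length_cons, List.replicate_succ,
      List.map_replicate, List.headD_cons, List.tail_cons, List.map_cons]
    rw [ih]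

-- the full transpose of our column family
theorem pv_zipTAux_cols (a : Int) (xs : List Int) (js : List Int) :
    pvZipTAux (a :: xs) (js.map (fun j => j :: List.replicate xs.length (0 : Int))) =
      (a :: js) :: xs.map (fun x => x :: List.replicate js.length (0 : Int)) := by
  rw [pvZipTAux]
  have hne : ((js.map (fun j => j :: List.replicate xs.length (0 : Int))).any List.isEmpty)
      = false := by
    simp [List.any_eq_false]
  rw [hne]
  simp only [Bool.false_eq_true, if_false, List.map_map, Function.comp_def, List.headD_cons,
    List.tail_cons]
  rw [show js.map (fun j => j) = js from List.map_id js,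
    show js.map (fun _ => List.replicate xs.length (0 : Int))
        = List.replicate js.length (List.replicate xs.length (0 : Int)) from by
      simp [List.map_const'],
    pv_zipTAux_zero]

theorem pv_B_eq (t c : Int) (ht : 0 ≤ t) (hc : 0 ≤ c) :
    initialize_levenshtein_matrix_alt t c = some (pvTarget t c) := by
  unfold initialize_levenshtein_matrix_alt
  rw [if_neg (by omega)]
  simp only
  rw [pv_foldl_snoc]
  simp only [List.singleton_append]
  rw [pvZipT]
  have hcol0 : PySem.List.pyRange 0 (t + 1) 1
      = 0 :: (List.range t.toNat).map (fun i => ((i + 1 : Nat) : Int)) := by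
    rw [show t + 1 = ((t.toNat + 1 : Nat) : Int) from by omega,
      PySem.List.pyRange_zero_natCast,
      show List.range (t.toNat + 1) = 0 :: (List.range t.toNat).map Nat.succ from
        List.range_succ_eq_map (n := t.toNat)]
    simp [Function.comp_def]
  rw [hcol0]
  have hlen : ((List.range t.toNat).map (fun i => ((i + 1 : Nat) : Int))).length = t.toNat := by
    simp
  rw [show (fun (j : Int) => j :: List.replicate t.toNat (0 : Int))
      = (fun (j : Int) => j ::
          List.replicate ((List.range t.toNat).map (fun i => ((i + 1 : Nat) : Int))).length
            (0 : Int)) from by rw [hlen]]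
  rw [pv_zipTAux_cols]
  rw [show ((PySem.List.pyRange 1 (c + 1) 1).length) = c.toNat from by
      rw [PySem.List.length_pyRange_one]; omega,
    show ((0 : Int) :: PySem.List.pyRange 1 (c + 1) 1) = PySem.List.pyRange 0 (c + 1) 1 from
      (PySem.List.pyRange_one_cons (by omega)).symm]
  unfold pvTarget
  simp [List.map_map, Function.comp_def]

-- ===== VERDICT (by name: the statement is the Claim_ definition above) =====
theorem initialize_levenshtein_matrix_spec : Claim_equal_initialize_levenshtein_matrix := by
  intro t c _
  unfold Spec_initialize_levenshtein_matrix
  by_cases h : t < 0 ∨ c < 0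
  · unfold initialize_levenshtein_matrix initialize_levenshtein_matrix_alt
    rw [if_pos h, if_pos h]
  · rw [pv_A_eq t c (by omega) (by omega), pv_B_eq t c (by omega) (by omega)]
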